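-- pv_equiv track=rewrite | github.com/binanddev/cstt | core.py | decode_bitstring
-- ===== SOURCE A (Python) =====
-- def decode_bitstring(bit_stream, code_table):
--     """Chuyển chuỗi bit về văn bản dựa trên bảng mã."""
--     reversed_code_table = {
--         code_bits: character for character, code_bits in code_table.items()
--     }
--     decoding_buffer = ""
--     decoded_characters = []
--
--     for bit in bit_stream:
--         decoding_buffer += bit
--         if decoding_buffer in reversed_code_table:
--             decoded_characters.append(reversed_code_table[decoding_buffer])
--             decoding_buffer = ""
--
--     return "".join(decoded_characters)
-- ===== SOURCE B (Python) =====
-- def decode_bitstring(bit_stream, code_table):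
--     """Chuyển chuỗi bit về văn bản dựa trên bảng mã."""
--     # Build a trie/DFA over the codes: states are ints (0 = root),
--     # transitions[(state, ch)] -> state, accept[state] -> character.
--     transitions = {}
--     accept = {}
--     next_state = 1
--     for character, code_bits in code_table.items():
--         node = 0
--         for ch in code_bits:
--             key = (node, ch)
--             if key not in transitions:
--                 transitions[key] = next_state
--                 next_state += 1
--             node = transitions[key]
--         accept[node] = character
--     decoded_characters = []
--     node = 0
--     for bit in bit_stream:
--         node = transitions.get((node, bit), -1)
--         if node in accept:
--             decoded_characters.append(accept[node])
--             node = 0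
--     return "".join(decoded_characters)
-- ===== Notes on version B (the rewrite author's own statement) =====
-- stated objective: alternative
-- what changed: Replaces the per-bit growing-buffer dict-membership scan with a trie/DFA built once from the codes; decoding advances one state per bit instead of re-testing an ever-growing buffer string.
import Mathlib
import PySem

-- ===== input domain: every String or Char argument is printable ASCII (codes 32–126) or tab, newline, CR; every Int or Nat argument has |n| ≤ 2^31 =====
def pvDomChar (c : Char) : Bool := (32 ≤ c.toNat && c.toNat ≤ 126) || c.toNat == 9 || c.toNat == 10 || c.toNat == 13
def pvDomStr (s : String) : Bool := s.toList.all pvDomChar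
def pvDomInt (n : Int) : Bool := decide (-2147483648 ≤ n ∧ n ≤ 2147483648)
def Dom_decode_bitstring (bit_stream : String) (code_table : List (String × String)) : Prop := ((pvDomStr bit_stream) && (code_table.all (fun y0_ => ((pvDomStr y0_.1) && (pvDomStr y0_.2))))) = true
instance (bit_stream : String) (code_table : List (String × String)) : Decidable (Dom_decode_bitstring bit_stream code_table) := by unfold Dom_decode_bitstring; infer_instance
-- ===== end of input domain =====

-- B replaces the per-bit growing-buffer dict lookup with a trie/DFA built once from the codes,
-- advancing one state per bit (objective: alternative algorithm).

-- ===== PORT A =====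
-- reversed_code_table = {code_bits: character for character, code_bits in code_table.items()}
-- (dict keys are the code strings; represented as their char lists — string equality is char-list equality)
def pvRevTable (items : List (String × String)) : PySem.Dict (List Char) String :=
  items.foldl (fun d p => d.insert p.2.toList p.1) PySem.Dict.empty

-- the for-loop over bit_stream: state = (decoding_buffer, decoded_characters)
def pvDecLoopA (rev : PySem.Dict (List Char) String) (buf : List Char) (outs : List String) :
    List Char → List String
  | [] => outs
  | c :: cs =>
    let buf' := buf ++ [c]
    match rev.get? buf' with
    | some ch => pvDecLoopA rev [] (outs ++ [ch]) cs
    | none => pvDecLoopA rev buf' outs cs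

def decode_bitstring (bit_stream : String) (code_table : List (String × String)) : String :=
  PySem.Str.join "" (pvDecLoopA (pvRevTable (PySem.Dict.ofList code_table).items) [] [] bit_stream.toList)

-- ===== PORT B =====
-- inner loop 'for ch in code_bits': state = (transitions, next_state, node)
def pvInsertCode (t : PySem.Dict (Int × Char) Int) (nx nd : Int) :
    List Char → PySem.Dict (Int × Char) Int × Int × Int
  | [] => (t, nx, nd)
  | c :: cs =>
    match t.get? (nd, c) with
    | some m => pvInsertCode t nx m cs
    | none => pvInsertCode (t.insert (nd, c) nx) (nx + 1) nx cs

-- outer loop 'for character, code_bits in code_table.items()': state = (transitions, next_state, accept)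
def pvBuild (t : PySem.Dict (Int × Char) Int) (nx : Int) (acc : PySem.Dict Int String) :
    List (String × String) → PySem.Dict (Int × Char) Int × Int × PySem.Dict Int String
  | [] => (t, nx, acc)
  | p :: rest =>
    let r := pvInsertCode t nx 0 p.2.toList
    pvBuild r.1 r.2.1 (acc.insert r.2.2 p.1) rest

-- decoding loop 'for bit in bit_stream': state = (node, decoded_characters)
def pvDecodeB (t : PySem.Dict (Int × Char) Int) (acc : PySem.Dict Int String) (nd : Int)
    (outs : List String) : List Char → List String
  | [] => outs
  | c :: cs =>
    let nd' := t.getD (nd, c) (-1)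
    match acc.get? nd' with
    | some ch => pvDecodeB t acc 0 (outs ++ [ch]) cs
    | none => pvDecodeB t acc nd' outs cs

def decode_bitstring_alt (bit_stream : String) (code_table : List (String × String)) : String :=
  let r := pvBuild PySem.Dict.empty 1 PySem.Dict.empty (PySem.Dict.ofList code_table).items
  PySem.Str.join "" (pvDecodeB r.1 r.2.2 0 [] bit_stream.toList)

-- ===== PRECONDITION & SPEC =====
def Spec_decode_bitstring (bit_stream : String) (code_table : List (String × String)) (out : String) : Prop := out = decode_bitstring_alt bit_stream code_table
instance (bit_stream : String) (code_table : List (String × String)) (out : String) : Decidable (Spec_decode_bitstring bit_stream code_table out) := by unfold Spec_decode_bitstring; infer_instance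

-- ===== CLAIM (what is proved, stated in full; the proofs are below) =====
def Claim_equal_decode_bitstring : Prop := ∀ (bit_stream : String) (code_table : List (String × String)), Dom_decode_bitstring bit_stream code_table → Spec_decode_bitstring bit_stream code_table (decode_bitstring bit_stream code_table)

-- ===== LEMMAS AND PROOFS =====

-- the state reached from nd by reading s in the trie (none = fell off)
def pvWalk (t : PySem.Dict (Int × Char) Int) (nd : Int) : List Char → Option Int
  | [] => some nd
  | c :: cs =>
    match t.get? (nd, c) with
    | some m => pvWalk t m cs
    | none => none

-- every transition goes from a state in [0, nx) to a strictly larger state below nx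
def pvInvT (t : PySem.Dict (Int × Char) Int) (nx : Int) : Prop :=
  ∀ p ∈ t.items, 0 ≤ p.1.1 ∧ p.1.1 < p.2 ∧ p.2 < nx

theorem pvWalk_append (t : PySem.Dict (Int × Char) Int) (nd : Int) (s : List Char) (c : Char) :
    pvWalk t nd (s ++ [c]) = (pvWalk t nd s).bind (fun m => t.get? (m, c)) := by
  induction s generalizing nd with
  | nil =>
    simp only [List.nil_append, pvWalk, Option.bind_some]
    cases t.get? (nd, c) <;> simp
  | cons c' s ih =>
    simp only [List.cons_append, pvWalk]
    cases t.get? (nd, c') with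
    | some m => exact ih m
    | none => simp

theorem pvWalk_le (t : PySem.Dict (Int × Char) Int) (nx : Int) (h : pvInvT t nx)
    (s : List Char) (a m : Int) (hw : pvWalk t a s = some m) : a ≤ m := by
  induction s generalizing a with
  | nil => simp [pvWalk] at hw; omega
  | cons c s ih =>
    simp only [pvWalk] at hw
    cases hg : t.get? (a, c) with
    | some m₁ =>
      rw [hg] at hw
      have hmem := PySem.Dict.mem_items_of_get?_eq_some _ hg
      have h1 := h _ hmem
      have h2 := ih m₁ hw
      dsimp only at h1
      omega
    | none => rw [hg] at hw; simp at hw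

theorem pvWalk_bounds (t : PySem.Dict (Int × Char) Int) (nx : Int) (h : pvInvT t nx)
    (s : List Char) (a m : Int) (ha0 : 0 ≤ a) (ha : a < nx) (hw : pvWalk t a s = some m) :
    0 ≤ m ∧ m < nx := by
  induction s generalizing a with
  | nil => simp [pvWalk] at hw; omega
  | cons c s ih =>
    simp only [pvWalk] at hw
    cases hg : t.get? (a, c) with
    | some m₁ =>
      rw [hg] at hw
      have hmem := PySem.Dict.mem_items_of_get?_eq_some _ hg
      have h1 := h _ hmem
      dsimp only at h1
      exact ih m₁ (by omega) (by omega) hw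
    | none => rw [hg] at hw; simp at hw

theorem pvWalk_inj (t : PySem.Dict (Int × Char) Int) (nx : Int) (h : pvInvT t nx)
    (hv : t.values.Nodup) (s₁ s₂ : List Char) (n : Int)
    (h₁ : pvWalk t 0 s₁ = some n) (h₂ : pvWalk t 0 s₂ = some n) : s₁ = s₂ := by
  induction s₁ using List.reverseRecOn generalizing s₂ n with
  | nil =>
    simp only [pvWalk, Option.some.injEq] at h₁
    subst h₁
    rcases List.eq_nil_or_concat s₂ with h | ⟨s₂', c₂, rfl⟩
    · exact h.symm ▸ rfl
    · rw [List.concat_eq_append, pvWalk_append] at h₂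
      cases hw : pvWalk t 0 s₂' with
      | none => rw [hw] at h₂; simp at h₂
      | some m₂ =>
        rw [hw] at h₂
        simp only [Option.bind_some] at h₂
        have hmem := PySem.Dict.mem_items_of_get?_eq_some _ h₂
        have hb := h _ hmem
        dsimp only at hb
        omega
  | append_singleton s₁' c₁ ih =>
    rw [pvWalk_append] at h₁
    cases hw₁ : pvWalk t 0 s₁' with
    | none => rw [hw₁] at h₁; simp at h₁
    | some m₁ =>
      rw [hw₁] at h₁
      simp only [Option.bind_some] at h₁
      rcases List.eq_nil_or_concat s₂ with rfl | ⟨s₂', c₂, rfl⟩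
      · simp only [pvWalk, Option.some.injEq] at h₂
        subst h₂
        have hmem := PySem.Dict.mem_items_of_get?_eq_some _ h₁
        have hb := h _ hmem
        dsimp only at hb
        omega
      · rw [List.concat_eq_append, pvWalk_append] at h₂
        cases hw₂ : pvWalk t 0 s₂' with
        | none => rw [hw₂] at h₂; simp at h₂
        | some m₂ =>
          rw [hw₂] at h₂
          simp only [Option.bind_some] at h₂
          have hm₁ := PySem.Dict.mem_items_of_get?_eq_some _ h₁
          have hm₂ := PySem.Dict.mem_items_of_get?_eq_some _ h₂
          have hvals : (t.items.map Prod.snd).Nodup := hv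
          have heq := List.inj_on_of_nodup_map hvals hm₁ hm₂ rfl
          have heq' : (m₁, c₁) = (m₂, c₂) := congrArg Prod.fst heq
          have hc : c₁ = c₂ := congrArg Prod.snd heq'
          have hmm : m₁ = m₂ := congrArg Prod.fst heq'
          subst hc
          rw [List.concat_eq_append, ih s₂' m₁ hw₁ (hmm ▸ hw₂)]

theorem pvWalk_single (t : PySem.Dict (Int × Char) Int) (a : Int) (c : Char) :
    pvWalk t a [c] = t.get? (a, c) := by
  simp only [pvWalk]
  cases t.get? (a, c) <;> simp

theorem pvWalk_insert_fresh (t : PySem.Dict (Int × Char) Int) (k : Int × Char) (v : Int)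
    (hk : t.get? k = none) (s : List Char) :
    ∀ a m, pvWalk t a s = some m → pvWalk (t.insert k v) a s = some m := by
  induction s with
  | nil => intro a m hw; exact hw
  | cons c cs ih =>
    intro a m hw
    simp only [pvWalk] at hw ⊢
    cases hg : t.get? (a, c) with
    | none => rw [hg] at hw; simp at hw
    | some m₁ =>
      rw [hg] at hw
      have hne : (a, c) ≠ k := by
        rintro rfl; rw [hk] at hg; exact (Option.some_ne_none m₁ hg.symm).elim
      rw [PySem.Dict.get?_insert, if_neg hne, hg]
      exact ih m₁ m hw

theorem pvInsertCode_spec (bits : List Char) :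
    ∀ (t : PySem.Dict (Int × Char) Int) (nx nd : Int),
    pvInvT t nx → t.keys.Nodup → t.values.Nodup → 0 ≤ nd → nd < nx →
    pvInvT (pvInsertCode t nx nd bits).1 (pvInsertCode t nx nd bits).2.1 ∧
    (pvInsertCode t nx nd bits).1.keys.Nodup ∧
    (pvInsertCode t nx nd bits).1.values.Nodup ∧
    nx ≤ (pvInsertCode t nx nd bits).2.1 ∧
    0 ≤ (pvInsertCode t nx nd bits).2.2 ∧
    (pvInsertCode t nx nd bits).2.2 < (pvInsertCode t nx nd bits).2.1 ∧
    pvWalk (pvInsertCode t nx nd bits).1 nd bits = some (pvInsertCode t nx nd bits).2.2 ∧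
    (∀ a s m, pvWalk t a s = some m → pvWalk (pvInsertCode t nx nd bits).1 a s = some m) ∧
    (∀ k v, (pvInsertCode t nx nd bits).1.get? k = some v → t.get? k = some v ∨ nx ≤ v) := by
  induction bits with
  | nil =>
    intro t nx nd hInv hkn hvn hnd0 hndx
    refine ⟨hInv, hkn, hvn, le_refl _, hnd0, hndx, rfl, fun a s m hw => hw, fun k v hv' => Or.inl hv'⟩
  | cons c cs ih =>
    intro t nx nd hInv hkn hvn hnd0 hndx
    cases hg : t.get? (nd, c) with
    | some m =>
      have hmem := PySem.Dict.mem_items_of_get?_eq_some _ hg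
      have hb := hInv _ hmem
      dsimp only at hb
      simp only [pvInsertCode, hg]
      obtain ⟨i1, i2, i3, i4, i5, i6, i7, i8, i9⟩ :=
        ih t nx m hInv hkn hvn (by omega) (by omega)
      refine ⟨i1, i2, i3, i4, i5, i6, ?_, i8, i9⟩
      have hg' : (pvInsertCode t nx m cs).1.get? (nd, c) = some m := by
        have := i8 nd [c] m (by rw [pvWalk_single]; exact hg)
        rwa [pvWalk_single] at this
      simp only [pvWalk, hg']
      exact i7
    | none =>
      have hcontains : t.contains (nd, c) = false := by
        rw [PySem.Dict.contains_eq_isSome_get?, hg]; rfl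
      have hitems := PySem.Dict.items_insert_of_not_contains t nx hcontains
      have hInv' : pvInvT (t.insert (nd, c) nx) (nx + 1) := by
        intro p hp
        rw [hitems, List.mem_append] at hp
        rcases hp with hp | hp
        · have := hInv _ hp
          exact ⟨this.1, this.2.1, by omega⟩
        · have hp' : p = ((nd, c), nx) := by simpa using hp
          subst hp'
          exact ⟨hnd0, hndx, by omega⟩
      have hkn' : (t.insert (nd, c) nx).keys.Nodup := PySem.Dict.nodup_keys_insert _ _ _ hkn
      have hvn' : (t.insert (nd, c) nx).values.Nodup := by
        have hveq : (t.insert (nd, c) nx).values = t.values ++ [nx] := by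
          simp only [PySem.Dict.values, hitems, List.map_append]; rfl
        rw [hveq, List.nodup_append]
        refine ⟨hvn, List.nodup_singleton _, ?_⟩
        intro v hv w hw
        have hw' : w = nx := by simpa using hw
        subst hw'
        simp only [PySem.Dict.values, List.mem_map] at hv
        obtain ⟨p, hp, rfl⟩ := hv
        have := hInv _ hp
        omega
      simp only [pvInsertCode, hg]
      obtain ⟨i1, i2, i3, i4, i5, i6, i7, i8, i9⟩ :=
        ih (t.insert (nd, c) nx) (nx + 1) nx hInv' hkn' hvn' (by omega) (by omega)
      refine ⟨i1, i2, i3, by omega, i5, i6, ?_, ?_, ?_⟩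
      · have hg1 : (t.insert (nd, c) nx).get? (nd, c) = some nx :=
          PySem.Dict.get?_insert_self _ _ _
        have hg' : (pvInsertCode (t.insert (nd, c) nx) (nx + 1) nx cs).1.get? (nd, c) = some nx := by
          have := i8 nd [c] nx (by rw [pvWalk_single]; exact hg1)
          rwa [pvWalk_single] at this
        simp only [pvWalk, hg']
        exact i7
      · intro a s m hw
        exact i8 a s m (pvWalk_insert_fresh t (nd, c) nx hg s a m hw)
      · intro k v hv'
        rcases i9 k v hv' with hv2 | hv2
        · rw [PySem.Dict.get?_insert] at hv2
          by_cases hkk : k = (nd, c)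
          · rw [if_pos hkk] at hv2
            right
            cases hv2
            exact le_refl _
          · rw [if_neg hkk] at hv2
            exact Or.inl hv2
        · right; omega

theorem pvWalk_reflect (t t₁ : PySem.Dict (Int × Char) Int) (nx nx₁ : Int)
    (h : pvInvT t nx) (h₁ : pvInvT t₁ nx₁)
    (hsub : ∀ k v, t₁.get? k = some v → t.get? k = some v ∨ nx ≤ v)
    (s : List Char) (a m : Int) (ha0 : 0 ≤ a) (ha : a < nx)
    (hw : pvWalk t₁ a s = some m) (hm : m < nx) : pvWalk t a s = some m := by
  induction s generalizing a with
  | nil => exact hw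
  | cons c cs ih =>
    simp only [pvWalk] at hw ⊢
    cases hg₁ : t₁.get? (a, c) with
    | none => rw [hg₁] at hw; simp at hw
    | some m₁ =>
      rw [hg₁] at hw
      rcases hsub _ _ hg₁ with hg | hge
      · have hb := h _ (PySem.Dict.mem_items_of_get?_eq_some _ hg)
        dsimp only at hb
        rw [hg]
        exact ih m₁ (by omega) (by omega) hw
      · have hle := pvWalk_le t₁ nx₁ h₁ cs m₁ m hw
        omega

theorem pvBuild_spec (items : List (String × String)) :
    ∀ (t : PySem.Dict (Int × Char) Int) (nx : Int) (acc : PySem.Dict Int String)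
      (rev : PySem.Dict (List Char) String),
    pvInvT t nx → t.keys.Nodup → t.values.Nodup → 1 ≤ nx →
    (∀ k ∈ acc.keys, 0 ≤ k ∧ k < nx) →
    (∀ s, rev.get? s = (pvWalk t 0 s).bind acc.get?) →
    pvInvT (pvBuild t nx acc items).1 (pvBuild t nx acc items).2.1 ∧
    1 ≤ (pvBuild t nx acc items).2.1 ∧
    (∀ k ∈ (pvBuild t nx acc items).2.2.keys, 0 ≤ k ∧ k < (pvBuild t nx acc items).2.1) ∧
    (∀ s, (items.foldl (fun d p => d.insert p.2.toList p.1) rev).get? s =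
          (pvWalk (pvBuild t nx acc items).1 0 s).bind (pvBuild t nx acc items).2.2.get?) := by
  induction items with
  | nil =>
    intro t nx acc rev hInv hkn hvn hnx hacc hsem
    exact ⟨hInv, hnx, hacc, hsem⟩
  | cons p rest ih =>
    intro t nx acc rev hInv hkn hvn hnx hacc hsem
    obtain ⟨i1, i2, i3, i4, i5, i6, i7, i8, i9⟩ :=
      pvInsertCode_spec p.2.toList t nx 0 hInv hkn hvn (le_refl 0) hnx
    set r₁ := pvInsertCode t nx 0 p.2.toList with hr₁
    have hacc' : ∀ k ∈ (acc.insert r₁.2.2 p.1).keys, 0 ≤ k ∧ k < r₁.2.1 := by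
      intro k hk
      rw [PySem.Dict.mem_keys_insert] at hk
      rcases hk with rfl | hk
      · exact ⟨i5, i6⟩
      · have := hacc k hk; omega
    have hsem' : ∀ s, (rev.insert p.2.toList p.1).get? s =
        (pvWalk r₁.1 0 s).bind (acc.insert r₁.2.2 p.1).get? := by
      intro s
      rw [PySem.Dict.get?_insert]
      by_cases hs : s = p.2.toList
      · subst hs
        rw [if_pos rfl, i7, Option.bind_some, PySem.Dict.get?_insert_self]
      · rw [if_neg hs]
        cases hw₁ : pvWalk r₁.1 0 s with
        | none =>
          have hwt : pvWalk t 0 s = none := by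
            cases hwt : pvWalk t 0 s with
            | none => rfl
            | some m => rw [i8 0 s m hwt] at hw₁; exact (Option.some_ne_none m hw₁).elim
          rw [hsem s, hwt]; rfl
        | some n =>
          have hnnd : n ≠ r₁.2.2 := by
            intro hcontra
            exact hs (pvWalk_inj r₁.1 r₁.2.1 i1 i3 s p.2.toList n hw₁ (hcontra ▸ i7))
          rw [Option.bind_some, PySem.Dict.get?_insert, if_neg hnnd]
          by_cases hlt : n < nx
          · have hwt : pvWalk t 0 s = some n :=
              pvWalk_reflect t r₁.1 nx r₁.2.1 hInv i1 i9 s 0 n (le_refl 0) hnx hw₁ hlt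
            rw [hsem s, hwt, Option.bind_some]
          · have hgn : acc.get? n = none := by
              rw [PySem.Dict.get?_eq_none_iff_not_mem_keys]
              intro hmem
              have := hacc n hmem
              omega
            rw [hgn]
            cases hwt : pvWalk t 0 s with
            | none => rw [hsem s, hwt]; rfl
            | some m =>
              have := i8 0 s m hwt
              rw [hw₁] at this
              have hmn : m = n := by cases this; rfl
              have hb := pvWalk_bounds t nx hInv s 0 m (le_refl 0) hnx hwt
              omega
    have hres := ih r₁.1 r₁.2.1 (acc.insert r₁.2.2 p.1) (rev.insert p.2.toList p.1)
      i1 i2 i3 (by omega) hacc' hsem'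
    simp only [pvBuild, List.foldl_cons]
    exact hres

theorem pvDecBridge (t : PySem.Dict (Int × Char) Int) (acc : PySem.Dict Int String)
    (rev : PySem.Dict (List Char) String) (nx : Int) (hInv : pvInvT t nx)
    (hk : ∀ k ∈ acc.keys, 0 ≤ k)
    (hsem : ∀ s, rev.get? s = (pvWalk t 0 s).bind acc.get?) :
    ∀ (cs buf : List Char) (outs : List String),
    pvDecLoopA rev buf outs cs = pvDecodeB t acc ((pvWalk t 0 buf).getD (-1)) outs cs := by
  have haccnone : acc.get? (-1) = none := by
    rw [PySem.Dict.get?_eq_none_iff_not_mem_keys]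
    intro hmem
    have := hk _ hmem
    omega
  intro cs
  induction cs with
  | nil => intro buf outs; rfl
  | cons c cs ih =>
    intro buf outs
    simp only [pvDecLoopA, pvDecodeB]
    cases hw : pvWalk t 0 buf with
    | some m =>
      simp only [Option.getD_some]
      rw [PySem.Dict.getD_eq_get?_getD]
      have hwb : pvWalk t 0 (buf ++ [c]) = t.get? (m, c) := by
        rw [pvWalk_append, hw, Option.bind_some]
      have hrev : rev.get? (buf ++ [c]) = (t.get? (m, c)).bind acc.get? := by
        rw [hsem, hwb]
      cases hg : t.get? (m, c) with
      | some n =>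
        rw [hg, Option.bind_some] at hrev
        simp only [Option.getD_some, hrev]
        cases ha : acc.get? n with
        | some ch =>
          have := ih [] (outs ++ [ch])
          simpa [pvWalk] using this
        | none =>
          have := ih (buf ++ [c]) outs
          rwa [hwb, hg, Option.getD_some] at this
      | none =>
        rw [hg, Option.bind_none] at hrev
        simp only [Option.getD_none, hrev, haccnone]
        have := ih (buf ++ [c]) outs
        rwa [hwb, hg, Option.getD_none] at this
    | none =>
      simp only [Option.getD_none]
      have hgdead : t.get? (-1, c) = none := by
        cases hgd : t.get? (-1, c) with
        | none => rfl
        | some v =>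
          have := hInv _ (PySem.Dict.mem_items_of_get?_eq_some _ hgd)
          dsimp only at this
          omega
      have hnd' : t.getD (-1, c) (-1) = -1 := by
        rw [PySem.Dict.getD_eq_get?_getD, hgdead]; rfl
      have hwb : pvWalk t 0 (buf ++ [c]) = none := by
        rw [pvWalk_append, hw, Option.bind_none]
      have hrev : rev.get? (buf ++ [c]) = none := by rw [hsem, hwb]; rfl
      rw [hnd', hrev, haccnone]
      have := ih (buf ++ [c]) outs
      rwa [hwb, Option.getD_none] at this

-- ===== VERDICT (by name: the statement is the Claim_ definition above) =====
theorem decode_bitstring_spec : Claim_equal_decode_bitstring := by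
  intro bs ct _
  unfold Spec_decode_bitstring decode_bitstring decode_bitstring_alt
  congr 1
  have hempty_items : (PySem.Dict.empty : PySem.Dict (Int × Char) Int).items = [] := rfl
  have hInv0 : pvInvT PySem.Dict.empty 1 := by
    intro p hp
    rw [hempty_items] at hp
    exact absurd hp (List.not_mem_nil)
  have hkn0 : (PySem.Dict.empty : PySem.Dict (Int × Char) Int).keys.Nodup := by
    rw [show (PySem.Dict.empty : PySem.Dict (Int × Char) Int).keys = [] from rfl]
    exact List.nodup_nil
  have hvn0 : (PySem.Dict.empty : PySem.Dict (Int × Char) Int).values.Nodup := by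
    rw [show (PySem.Dict.empty : PySem.Dict (Int × Char) Int).values = [] from rfl]
    exact List.nodup_nil
  have hacc0 : ∀ k ∈ (PySem.Dict.empty : PySem.Dict Int String).keys, 0 ≤ k ∧ k < 1 := by
    intro k hk
    rw [show (PySem.Dict.empty : PySem.Dict Int String).keys = [] from rfl] at hk
    exact absurd hk (List.not_mem_nil)
  have hsem0 : ∀ s, (PySem.Dict.empty : PySem.Dict (List Char) String).get? s =
      (pvWalk PySem.Dict.empty 0 s).bind (PySem.Dict.empty : PySem.Dict Int String).get? := by
    intro s
    rw [PySem.Dict.get?_empty]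
    cases pvWalk PySem.Dict.empty 0 s with
    | none => rfl
    | some m => rw [Option.bind_some, PySem.Dict.get?_empty]
  obtain ⟨j1, j2, j3, j4⟩ := pvBuild_spec (PySem.Dict.ofList ct).items
    PySem.Dict.empty 1 PySem.Dict.empty PySem.Dict.empty hInv0 hkn0 hvn0 (le_refl 1) hacc0 hsem0
  have hbridge := pvDecBridge
    (pvBuild PySem.Dict.empty 1 PySem.Dict.empty (PySem.Dict.ofList ct).items).1
    (pvBuild PySem.Dict.empty 1 PySem.Dict.empty (PySem.Dict.ofList ct).items).2.2
    (pvRevTable (PySem.Dict.ofList ct).items)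
    (pvBuild PySem.Dict.empty 1 PySem.Dict.empty (PySem.Dict.ofList ct).items).2.1
    j1 (fun k hk => (j3 k hk).1) j4 bs.toList [] []
  rw [hbridge]
  rfl
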